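-- pv_equiv track=rewrite | github.com/cheomji/ComputatiaonalThinking-and-SWcoding | 221011/Lab4_practice#2.py | firstNEnenFibonacciNumbers
-- ===== SOURCE A (Python) =====
-- def firstNEnenFibonacciNumbers(n):
--     fibo = []
--     lst = [1,1]
--     cnt = 0
--     while cnt != n:
--         if (lst[-1] + lst[-2])%2 == 0:
--             cnt += 1
--             fibo.append(lst[-1] + lst[-2])
--         lst.append(lst[-1] + lst[-2])
--     return fibo
-- ===== SOURCE B (Python) =====
-- def firstNEnenFibonacciNumbers(n):
--     # even-Fibonacci recurrence E_k = 4*E_{k-1} + E_{k-2}, with E_0 = 0, E_1 = 2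
--     res = []
--     a, b = 0, 2
--     for _ in range(n):
--         res.append(b)
--         a, b = b, 4 * b + a
--     return res
-- ===== Notes on version B (the rewrite author's own statement) =====
-- stated objective: faster
-- what changed: Replaces generating every Fibonacci number and testing parity (and keeping the whole list) with the even-Fibonacci recurrence E_k = 4*E_{k-1} + E_{k-2}, producing each output directly with two scalars.
import Mathlib
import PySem

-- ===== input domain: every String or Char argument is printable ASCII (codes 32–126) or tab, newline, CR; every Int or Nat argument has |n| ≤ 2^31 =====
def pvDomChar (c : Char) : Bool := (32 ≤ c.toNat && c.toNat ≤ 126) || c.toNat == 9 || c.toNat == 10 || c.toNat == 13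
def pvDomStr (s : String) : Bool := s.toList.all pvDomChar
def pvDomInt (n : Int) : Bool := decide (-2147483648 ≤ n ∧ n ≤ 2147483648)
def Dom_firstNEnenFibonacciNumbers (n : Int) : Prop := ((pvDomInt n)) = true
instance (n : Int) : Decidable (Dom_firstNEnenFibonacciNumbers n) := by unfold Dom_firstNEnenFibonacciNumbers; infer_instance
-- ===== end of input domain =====

-- B replaces per-Fibonacci parity testing over a growing list with the even-Fibonacci
-- recurrence E_k = 4*E_{k-1} + E_{k-2}, keeping only two scalars (constant-factor faster).


-- ===== PORT A =====
-- A's while loop; `x`/`y` are lst[-2]/lst[-1] (the only entries the loop reads).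
-- The fuel is only a totality guard: with 0 ≤ n the loop performs max (3*n-2) 0
-- iterations, so fuel 3*n.toNat+1 is never exhausted.  `%` on divisor 2 equals Int.emod.
def pvALoop (fuel : Nat) (fibo : List Int) (x y cnt n : Int) : List Int :=
  match fuel with
  | 0 => fibo
  | f+1 =>
    if cnt = n then fibo
    else
      if (x + y) % 2 = 0 then pvALoop f (fibo ++ [x + y]) y (x + y) (cnt + 1) n
      else pvALoop f fibo y (x + y) cnt n

def firstNEnenFibonacciNumbers (n : Int) : List Int :=
  pvALoop (3 * n.toNat + 1) [] 1 1 0 n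

-- ===== PORT B =====
def pvBLoop (k : Nat) (a b : Int) (res : List Int) : List Int :=
  match k with
  | 0 => res
  | k+1 => pvBLoop k b (4 * b + a) (res ++ [b])

def firstNEnenFibonacciNumbers_alt (n : Int) : List Int :=
  pvBLoop n.toNat 0 2 []

-- ===== PRECONDITION & SPEC =====
-- Pre_ excludes n < 0, on which A's while loop never satisfies cnt != n and diverges.
def Pre_firstNEnenFibonacciNumbers (n : Int) : Prop := 0 ≤ n
instance (n : Int) : Decidable (Pre_firstNEnenFibonacciNumbers n) := by unfold Pre_firstNEnenFibonacciNumbers; infer_instance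
def pvWitness_firstNEnenFibonacciNumbers : Int := 5

def Spec_firstNEnenFibonacciNumbers (n : Int) (out : List Int) : Prop := out = firstNEnenFibonacciNumbers_alt n
instance (n : Int) (out : List Int) : Decidable (Spec_firstNEnenFibonacciNumbers n out) := by unfold Spec_firstNEnenFibonacciNumbers; infer_instance

-- ===== CLAIM (what is proved, stated in full; the proofs are below) =====
def Claim_equal_firstNEnenFibonacciNumbers : Prop := ∀ (n : Int), Dom_firstNEnenFibonacciNumbers n → Pre_firstNEnenFibonacciNumbers n → Spec_firstNEnenFibonacciNumbers n (firstNEnenFibonacciNumbers n)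

-- ===== LEMMAS AND PROOFS =====

-- From an odd-odd state (x, y) the loop emits one even value x+y every 3 iterations,
-- and successive evens satisfy B's recurrence: prev even = y-x, next even = x+y.
theorem pvALoop_eq_pvBLoop (k : Nat) : ∀ (fibo : List Int) (x y cnt n : Int),
    n = cnt + k → x % 2 = 1 → y % 2 = 1 →
    pvALoop (3 * k + 1) fibo x y cnt n = pvBLoop k (y - x) (x + y) fibo := by
  induction k with
  | zero =>
    intro fibo x y cnt n hn _ _
    simp [pvALoop, pvBLoop, hn]
  | succ k ih =>
    intro fibo x y cnt n hn hx hy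
    have hne : cnt ≠ n := by omega
    have h1 : (x + y) % 2 = 0 := by omega
    have hfuel : 3 * (k + 1) + 1 = (3 * k + 1) + 1 + 1 + 1 := by ring
    rw [hfuel, pvALoop, if_neg hne, if_pos h1]
    cases k with
    | zero =>
      -- last even emitted: the loop exits right after this iteration
      have hstop : cnt + 1 = n := by omega
      rw [pvALoop, if_pos hstop]
      simp [pvBLoop]
    | succ j =>
      have hne1 : ¬ (cnt + 1 = n) := by omega
      have h2 : ¬ ((y + (x + y)) % 2 = 0) := by omega
      have h3 : ¬ (((x + y) + (y + (x + y))) % 2 = 0) := by omega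
      rw [pvALoop, if_neg hne1, if_neg h2]
      rw [pvALoop, if_neg hne1, if_neg h3]
      rw [ih (fibo ++ [x + y]) (y + (x + y)) ((x + y) + (y + (x + y))) (cnt + 1) n
        (by omega) (by omega) (by omega)]
      have e1 : (x + y) + (y + (x + y)) - (y + (x + y)) = x + y := by ring
      have e2 : (y + (x + y)) + ((x + y) + (y + (x + y))) = 4 * (x + y) + (y - x) := by ring
      rw [e1, e2]
      simp [pvBLoop]

-- ===== VERDICT (by name: the statement is the Claim_ definition above) =====
theorem firstNEnenFibonacciNumbers_spec : Claim_equal_firstNEnenFibonacciNumbers := by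
  intro n _ hpre
  unfold Pre_firstNEnenFibonacciNumbers at hpre
  unfold Spec_firstNEnenFibonacciNumbers firstNEnenFibonacciNumbers firstNEnenFibonacciNumbers_alt
  have hn : n = 0 + (n.toNat : Int) := by omega
  rw [pvALoop_eq_pvBLoop n.toNat [] 1 1 0 n hn (by decide) (by decide)]
  norm_num
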